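-- pv_equiv track=rewrite | github.com/ctcutler/music-as-code | cyclemidi.py | expand_alternatives
-- ===== SOURCE A (Python) =====
-- def expand_alternatives(s: str) -> str:
--     """
--     Recursively expands out all alternative cycles by making copies of the whole string
--     starting with the most deeply nested alternative cycles.
--     """
--     start = None
--     end = None
--
--     # find the first complete angle bracket pair, a.k.a. the first one that doesn't
--     # have another nested within it
--     for i, c in enumerate(s):
--         if c == "<":
--             start = i
--         elif c == ">":
--             end = i + 1
--             break
--
--     if start is not None and end is not None:
--         alternative_cycle = s[start:end]
--         cycle_elements = alternative_cycle.strip("<>").split(" ")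
--         copies = [
--             expand_alternatives(f"{s[:start]}{element}{s[end:]}")
--             for element in cycle_elements
--         ]
--         return " ".join(copies)
--     else:
--         return s
-- ===== SOURCE B (Python) =====
-- def expand_alternatives(s: str) -> str:
--     leaves = []
--     _collect(s, leaves)
--     return " ".join(leaves)
--
--
-- def _collect(t: str, leaves: list) -> None:
--     gt = t.find(">")
--     lt = -1 if gt == -1 else t.rfind("<", 0, gt)
--     if lt == -1:
--         leaves.append(t)
--     else:
--         pre, suf = t[:lt], t[gt + 1:]
--         for element in t[lt + 1:gt].split(" "):
--             _collect(pre + element + suf, leaves)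
-- ===== Notes on version B (the rewrite author's own statement) =====
-- stated objective: faster
-- what changed: A recursively joins at every level (each recursive call returns an already-joined string, scanning for the bracket pair with a manual enumerate loop); B does a flat depth-first traversal that appends finished leaf strings to a single accumulator list, locates the pair with str.find/str.rfind, and joins once at the end, avoiding the repeated intermediate join/copy work.
import Mathlib
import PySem

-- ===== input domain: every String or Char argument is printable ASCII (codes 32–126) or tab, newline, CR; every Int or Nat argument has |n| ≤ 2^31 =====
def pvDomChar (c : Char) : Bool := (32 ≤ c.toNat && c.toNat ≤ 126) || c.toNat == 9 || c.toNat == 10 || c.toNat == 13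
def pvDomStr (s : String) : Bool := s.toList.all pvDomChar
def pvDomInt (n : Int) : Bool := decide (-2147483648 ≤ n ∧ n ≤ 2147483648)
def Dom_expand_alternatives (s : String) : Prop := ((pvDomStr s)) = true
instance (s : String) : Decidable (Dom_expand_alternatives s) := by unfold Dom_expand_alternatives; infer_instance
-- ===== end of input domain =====

-- B replaces A's nested recursive joins and manual index scan by a flat DFS collecting
-- finished leaves into one accumulator (pair located via find/rfind) joined once at the end.

-- ===== PORT A =====

-- A's enumerate loop: start := index of each '<' seen; break at the first '>' with end := i+1.
def scanA (i : Nat) (st : Option Nat) : List Char → Option Nat × Option Nat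
  | [] => (st, none)
  | c :: rest =>
    if c = '<' then scanA (i+1) (some i) rest
    else if c = '>' then (st, some (i+1))
    else scanA (i+1) st rest

-- ---- helper lemmas used (transitively) by the two termination proofs; everything here is
-- ---- cited by subst_lt_A / subst_lt_B, which the ports cite in their decreasing_by ----

-- the value A's loop leaves in `start` after processing a '>'-free prefix
def lastLt (i : Nat) (st : Option Nat) : List Char → Option Nat
  | [] => st
  | c :: rest => lastLt (i+1) (if c = '<' then some i else st) rest

theorem prefix_single {c : Char} {xs : List Char} : [c] <+: xs ↔ xs.head? = some c := by
  constructor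
  · rintro ⟨t, rfl⟩; rfl
  · intro h
    cases xs with
    | nil => simp at h
    | cons a t =>
      simp only [List.head?_cons, Option.some.injEq] at h
      subst h; exact ⟨t, rfl⟩

theorem mem_split_first {c : Char} {l : List Char} (h : c ∈ l) :
    ∃ p r, l = p ++ c :: r ∧ c ∉ p := by
  induction l with
  | nil => cases h
  | cons a t ih =>
    by_cases ha : a = c
    · subst ha; exact ⟨[], t, rfl, by simp⟩
    · have hc : c ∈ t := by
        cases h with
        | head => exact absurd rfl ha
        | tail _ h => exact h
      obtain ⟨p, r, rfl, hp⟩ := ih hc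
      exact ⟨a :: p, r, rfl, by simp [hp]; exact fun h => ha h.symm⟩

theorem mem_split_last {c : Char} {l : List Char} (h : c ∈ l) :
    ∃ p r, l = p ++ c :: r ∧ c ∉ r := by
  have h' : c ∈ l.reverse := by simpa using h
  obtain ⟨p, r, hl, hp⟩ := mem_split_first h'
  refine ⟨r.reverse, p.reverse, ?_, by simpa using hp⟩
  have := congrArg List.reverse hl
  simpa [List.reverse_append] using this

theorem infix_single {c : Char} {xs : List Char} : [c] <:+: xs ↔ c ∈ xs := by
  constructor
  · rintro ⟨s, t, rfl⟩; simp
  · intro h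
    obtain ⟨p, r, rfl⟩ := List.append_of_mem h
    exact ⟨p, r, by simp⟩

theorem fgo_first (c : Char) (pre rest : List Char) (k : Nat) (h : c ∉ pre) :
    PySem.Chars.find.go [c] (pre ++ c :: rest) k = (k : Int) + pre.length := by
  induction pre generalizing k with
  | nil =>
    simp only [List.nil_append]
    rw [PySem.Chars.find.go]
    simp [List.isPrefixOf]
  | cons a pre ih =>
    have ha : a ≠ c := fun hh => h (hh ▸ List.mem_cons_self ..)
    simp only [List.cons_append]
    rw [PySem.Chars.find.go]
    have hnp : [c].isPrefixOf (a :: (pre ++ c :: rest)) = false := by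
      simp [List.isPrefixOf, Ne.symm ha]
    simp only [List.cons_append, hnp, Bool.false_eq_true, if_false]
    rw [ih (k+1) (fun hh => h (List.mem_cons_of_mem _ hh))]
    simp; push_cast; ring

theorem find_first (c : Char) (pre rest : List Char) (h : c ∉ pre) :
    PySem.Chars.find (pre ++ c :: rest) [c] = (pre.length : Int) := by
  unfold PySem.Chars.find
  rw [fgo_first c pre rest 0 h]
  simp

theorem rgo_hit (s : List Char) (c : Char) (j k : Nat) (hk : s[k]? = some c)
    (hmax : ∀ i, k < i → i ≤ j → s[i]? ≠ some c) (hkj : k ≤ j) :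
    PySem.Chars.rfind.go s [c] j = (k : Int) := by
  induction j with
  | zero =>
    have hk0 : k = 0 := Nat.le_zero.mp hkj
    subst hk0
    rw [PySem.Chars.rfind.go]
    have : [c] <+: s := prefix_single.mpr (by simpa [← List.head?_drop] using hk)
    simp [List.isPrefixOf_iff_prefix.mpr this]
  | succ j ih =>
    rw [PySem.Chars.rfind.go]
    by_cases hkj' : k = j + 1
    · have hp1 : [c] <+: s.drop (j+1) := prefix_single.mpr (by rw [List.head?_drop, ← hkj']; exact hk)
      simp [List.isPrefixOf_iff_prefix.mpr hp1, hkj']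
    · have hklt : k ≤ j := by omega
      have hnp : ¬ [c] <+: s.drop (j+1) := by
        rw [prefix_single, List.head?_drop]
        exact hmax (j+1) (by omega) (le_refl _)
      have : [c].isPrefixOf (s.drop (j+1)) = false := by
        rw [← Bool.not_eq_true, List.isPrefixOf_iff_prefix]; exact hnp
      simp only [this, Bool.false_eq_true, if_false]
      exact ih (fun i hi hij => hmax i hi (by omega)) hklt

theorem rgo_miss (s : List Char) (c : Char) (j : Nat) (h : ∀ i ≤ j, s[i]? ≠ some c) :
    PySem.Chars.rfind.go s [c] j = -1 := by
  induction j with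
  | zero =>
    rw [PySem.Chars.rfind.go]
    have hnp : ¬ [c] <+: s := by
      rw [prefix_single, ← List.drop_zero (l := s), List.head?_drop]
      exact h 0 (le_refl _)
    have : [c].isPrefixOf s = false := by
      rw [← Bool.not_eq_true, List.isPrefixOf_iff_prefix]; exact hnp
    simp [this]
  | succ j ih =>
    rw [PySem.Chars.rfind.go]
    have hnp : ¬ [c] <+: s.drop (j+1) := by
      rw [prefix_single, List.head?_drop]
      exact h (j+1) (le_refl _)
    have : [c].isPrefixOf (s.drop (j+1)) = false := by
      rw [← Bool.not_eq_true, List.isPrefixOf_iff_prefix]; exact hnp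
    simp only [this, Bool.false_eq_true, if_false]
    exact ih (fun i hi => h i (by omega))

theorem lastLt_append (i : Nat) (st : Option Nat) (xs ys : List Char) :
    lastLt i st (xs ++ ys) = lastLt (i + xs.length) (lastLt i st xs) ys := by
  induction xs generalizing i st with
  | nil => simp [lastLt]
  | cons a xs ih =>
    simp only [List.cons_append, lastLt, ih, List.length_cons]
    congr 1
    omega

theorem lastLt_no (m : List Char) (i : Nat) (st : Option Nat) (h : '<' ∉ m) :
    lastLt i st m = st := by
  induction m generalizing i st with
  | nil => rfl
  | cons a m ih =>
    have ha : a ≠ '<' := fun hh => h (hh ▸ List.mem_cons_self ..)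
    simp only [lastLt, ha, if_false]
    exact ih _ _ (fun hh => h (List.mem_cons_of_mem _ hh))

theorem lastLt_last (q m : List Char) (i : Nat) (st : Option Nat) (h : '<' ∉ m) :
    lastLt i st (q ++ '<' :: m) = some (i + q.length) := by
  rw [lastLt_append]
  simp only [lastLt, if_pos rfl]
  exact lastLt_no m _ _ h

theorem scan_pre (pre rest : List Char) (i : Nat) (st : Option Nat) (h : '>' ∉ pre) :
    scanA i st (pre ++ '>' :: rest) = (lastLt i st pre, some (i + pre.length + 1)) := by
  induction pre generalizing i st with
  | nil =>
    simp [scanA, lastLt]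
  | cons a pre ih =>
    have ha : a ≠ '>' := fun hh => h (hh ▸ List.mem_cons_self ..)
    have h' : '>' ∉ pre := fun hh => h (List.mem_cons_of_mem _ hh)
    by_cases hlt : a = '<'
    · simp [scanA, hlt, ha, ih _ _ h', lastLt, Prod.ext_iff]
      omega
    · simp [scanA, hlt, ha, ih _ _ h', lastLt, Prod.ext_iff]
      omega

theorem scan_no_gt (cs : List Char) (i : Nat) (st : Option Nat) (h : '>' ∉ cs) :
    scanA i st cs = (lastLt i st cs, none) := by
  induction cs generalizing i st with
  | nil => rfl
  | cons a cs ih =>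
    have ha : a ≠ '>' := fun hh => h (hh ▸ List.mem_cons_self ..)
    have h' : '>' ∉ cs := fun hh => h (List.mem_cons_of_mem _ hh)
    by_cases hlt : a = '<'
    · simp [scanA, hlt, ha, ih _ _ h', lastLt]
    · simp [scanA, hlt, ha, ih _ _ h', lastLt]

-- canonical decomposition of an input on which A's scan finds a complete pair
theorem scan_some (cs : List Char) (st en : Nat) (h : scanA 0 none cs = (some st, some en)) :
    ∃ q m rest, cs = q ++ '<' :: m ++ '>' :: rest ∧ st = q.length ∧
      en = q.length + m.length + 2 ∧ '>' ∉ q ∧ '>' ∉ m ∧ '<' ∉ m := by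
  by_cases hgt : '>' ∈ cs
  · obtain ⟨pre, rest, rfl, hpre⟩ := mem_split_first hgt
    rw [scan_pre pre rest 0 none hpre] at h
    by_cases hlt : '<' ∈ pre
    · obtain ⟨q, m, rfl, hm⟩ := mem_split_last hlt
      rw [lastLt_last q m 0 none hm] at h
      obtain ⟨h1, h2⟩ := Prod.mk.injEq .. ▸ h
      have hst : st = q.length := by
        have := h1
        simp at this
        omega
      have hen : en = q.length + m.length + 2 := by
        have := h2
        simp at this
        omega
      refine ⟨q, m, rest, by simp, hst, hen, ?_, ?_, hm⟩
      · exact fun hh => hpre (List.mem_append_left _ hh)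
      · exact fun hh => hpre (List.mem_append_right _ (List.mem_cons_of_mem _ hh))
    · rw [lastLt_no pre 0 none hlt] at h
      simp at h
  · rw [scan_no_gt cs 0 none hgt] at h
    simp at h

theorem sp_go_len (sep : List Char) (fuel : Nat) :
    ∀ l cur acc p, p ∈ PySem.Chars.splitOn.go sep fuel l cur acc →
      p ∈ acc ∨ p.length ≤ cur.length + l.length := by
  induction fuel with
  | zero =>
    intro l cur acc p hp
    rw [PySem.Chars.splitOn.go] at hp
    simp only [List.mem_reverse, List.mem_cons] at hp
    rcases hp with hp | hp
    · right; simp [hp]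
    · left; exact hp
  | succ fuel ih =>
    intro l cur acc p hp
    match l with
    | [] =>
      rw [PySem.Chars.splitOn.go] at hp
      · simp only [List.mem_reverse, List.mem_cons] at hp
        rcases hp with hp | hp
        · right; simp [hp]
        · left; exact hp
      · intro hh; omega
    | c :: rest =>
      rw [PySem.Chars.splitOn.go] at hp
      by_cases hpre : sep.isPrefixOf (c :: rest)
      · simp only [hpre, if_true] at hp
        rcases ih _ _ _ p hp with hp' | hp'
        · rcases List.mem_cons.mp hp' with hp'' | hp''
          · right
            simp [hp'']
          · left; exact hp''
        · right
          have : (List.drop sep.length (c :: rest)).length ≤ (c :: rest).length := by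
            simp
          simp at hp' ⊢
          omega
      · simp only [hpre, Bool.false_eq_true, if_false] at hp
        rcases ih _ _ _ p hp with hp' | hp'
        · left; exact hp'
        · right
          simp at hp' ⊢
          omega

theorem sp_len (s sep p : List Char) (hp : p ∈ PySem.Chars.splitOn s sep) :
    p.length ≤ s.length := by
  unfold PySem.Chars.splitOn at hp
  rcases sp_go_len sep (s.length + 1) s [] [] p hp with h | h
  · cases h
  · simpa using h

theorem strip_mid (m : List Char) (h : ∀ c ∈ m, c ≠ '<' ∧ c ≠ '>') :
    PySem.Chars.stripChars ('<' :: (m ++ ['>'])) ['<', '>'] = m := by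
  have hfalse : ∀ x ∈ m, (['<', '>'].contains x) = false := by
    intro x hx
    rcases h x hx with ⟨h1, h2⟩
    simp [h1, h2]
  have dropWhile_false : ∀ (xs : List Char), (∀ x ∈ xs, (['<', '>'].contains x) = false) →
      List.dropWhile (fun c => List.contains ['<', '>'] c) xs = xs := by
    intro xs hxs
    cases xs with
    | nil => rfl
    | cons a t =>
      have ht := hxs a (List.mem_cons_self ..)
      simp at ht
      simp [List.dropWhile_cons, ht.1, ht.2]
  unfold PySem.Chars.stripChars
  show (List.dropWhile (fun c => List.contains ['<', '>'] c)
      (List.dropWhile (fun c => List.contains ['<', '>'] c) ('<' :: (m ++ ['>']))).reverse).reverse = m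
  rw [List.dropWhile_cons]
  simp only [show (List.contains ['<', '>'] '<') = true from rfl, if_true]
  cases m with
  | nil => simp
  | cons a m' =>
    rw [show (a :: m') ++ ['>'] = a :: (m' ++ ['>']) from rfl, List.dropWhile_cons]
    simp only [hfalse a (List.mem_cons_self ..), Bool.false_eq_true, if_false]
    rw [List.reverse_cons]
    rw [show (m' ++ ['>']).reverse = '>' :: m'.reverse from by simp]
    rw [show ('>' :: m'.reverse) ++ [a] = '>' :: (m'.reverse ++ [a]) from rfl, List.dropWhile_cons]
    simp only [show (List.contains ['<', '>'] '>') = true from rfl, if_true]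
    rw [dropWhile_false (m'.reverse ++ [a]) ?side]
    case side =>
      intro x hx
      rcases List.mem_append.mp hx with hx | hx
      · exact hfalse x (List.mem_cons_of_mem _ (List.mem_reverse.mp hx))
      · simp at hx
        exact hfalse x (hx ▸ List.mem_cons_self ..)
    simp

-- slice computations under the canonical decomposition
theorem slice_pre (q m rest : List Char) :
    PySem.List.slice (q ++ '<' :: m ++ '>' :: rest) none (some ((q.length : Nat) : Int)) = q := by
  rw [PySem.List.slice_to _ (by positivity)]
  simp [List.take_append]

theorem slice_cyc (q m rest : List Char) :
    PySem.List.slice (q ++ '<' :: m ++ '>' :: rest) (some ((q.length : Nat) : Int))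
      (some ((q.length + m.length + 2 : Nat) : Int)) = '<' :: (m ++ ['>']) := by
  rw [show ((q.length : Nat) : Int) = ((q.length : Nat) : Int) from rfl]
  rw [PySem.List.slice_natCast]
  rw [show q ++ '<' :: m ++ '>' :: rest = q ++ ('<' :: m ++ '>' :: rest) from by simp]
  rw [List.drop_left]
  have : q.length + m.length + 2 - q.length = m.length + 2 := by omega
  rw [this]
  rw [show ('<' :: m ++ '>' :: rest) = ('<' :: m) ++ ('>' :: rest) from by simp]
  rw [List.take_append]
  simp [List.take_of_length_le, show m.length + 2 - ('<' :: m).length = 1 from by simp]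

theorem slice_suf (q m rest : List Char) :
    PySem.List.slice (q ++ '<' :: m ++ '>' :: rest) (some ((q.length + m.length + 2 : Nat) : Int)) none = rest := by
  rw [PySem.List.slice_from _ (by positivity)]
  rw [show q ++ '<' :: m ++ '>' :: rest = (q ++ '<' :: m ++ ['>']) ++ rest from by simp]
  rw [List.drop_left']
  simp
  omega

theorem slice_mid (q m rest : List Char) :
    PySem.List.slice (q ++ '<' :: m ++ '>' :: rest) (some ((q.length : Int) + 1))
      (some ((q.length + m.length + 1 : Nat) : Int)) = m := by
  rw [show ((q.length : Int) + 1) = (((q.length + 1 : Nat)) : Int) from by push_cast; ring]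
  rw [PySem.List.slice_natCast]
  rw [show q ++ '<' :: m ++ '>' :: rest = (q ++ ['<']) ++ (m ++ '>' :: rest) from by simp]
  rw [List.drop_left' (by simp)]
  have : q.length + m.length + 1 - (q.length + 1) = m.length := by omega
  rw [this, List.take_append]
  simp

-- B's pair-finding on the canonical decomposition
theorem find_gt (q m rest : List Char) (hq : '>' ∉ q) (hm : '>' ∉ m) :
    PySem.Chars.find (q ++ '<' :: m ++ '>' :: rest) ['>'] = ((q.length + m.length + 1 : Nat) : Int) := by
  have hpre : '>' ∉ q ++ '<' :: m := by
    intro hh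
    rcases List.mem_append.mp hh with hh | hh
    · exact hq hh
    · rcases List.mem_cons.mp hh with hh | hh
      · exact absurd hh.symm (by decide)
      · exact hm hh
  rw [show q ++ '<' :: m ++ '>' :: rest = (q ++ '<' :: m) ++ '>' :: rest from by simp]
  rw [find_first '>' _ rest hpre]
  simp
  omega

theorem rfind_lt (q m rest : List Char) (hm : '<' ∉ m) :
    PySem.Chars.rfindFrom (q ++ '<' :: m ++ '>' :: rest) ['<'] 0
      (some ((q.length + m.length + 1 : Nat) : Int)) = (q.length : Int) := by
  have hlen : (q ++ '<' :: m ++ '>' :: rest).length = q.length + m.length + rest.length + 2 := by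
    simp; omega
  unfold PySem.Chars.rfindFrom
  have h1 : ¬ ((q ++ '<' :: m ++ '>' :: rest).length : Int) < ((q.length + m.length + 1 : Nat) : Int) := by
    rw [hlen]; push_cast; omega
  have h2 : ¬ ((0 : Int) < 0) := by omega
  simp only [h1, if_false, if_neg (by omega : ¬ ((0:Int) < 0)), if_neg (by push_cast; omega : ¬ (((q.length + m.length + 1 : Nat) : Int) < (0:Int)))]
  have htake : (List.drop (Int.toNat 0) (List.take ((((q.length + m.length + 1 : Nat)) : Int)).toNat (q ++ '<' :: m ++ '>' :: rest))) = q ++ '<' :: m := by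
    rw [show q ++ '<' :: m ++ '>' :: rest = (q ++ '<' :: m) ++ '>' :: rest from by simp]
    rw [show ((((q.length + m.length + 1 : Nat)) : Int)).toNat = (q ++ '<' :: m).length from by simp; omega]
    rw [List.take_left]
    simp
  rw [htake]
  have hrf : PySem.Chars.rfind (q ++ '<' :: m) ['<'] = (q.length : Int) := by
    unfold PySem.Chars.rfind
    apply rgo_hit
    · rw [List.getElem?_append_right (le_refl _)]
      simp
    · intro i hi hij
      rw [List.getElem?_append_right (by omega)]
      have hsucc : i - q.length = (i - q.length - 1) + 1 := by omega
      rw [hsucc, List.getElem?_cons_succ]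
      intro hx
      exact hm (List.mem_of_getElem? hx)
    · simp
  rw [hrf]
  simp

theorem rfind_none (s : List Char) (c : Char) (h : c ∉ s) :
    PySem.Chars.rfind s [c] = -1 := by
  unfold PySem.Chars.rfind
  apply rgo_miss
  intro i _ hx
  exact h (List.mem_of_getElem? hx)

theorem rfindFrom_take (t sub : List Char) (g : Nat) (hg : g ≤ t.length) :
    PySem.Chars.rfindFrom t sub 0 (some ((g : Nat) : Int)) =
      if PySem.Chars.rfind (t.take g) sub = -1 then -1 else PySem.Chars.rfind (t.take g) sub := by
  unfold PySem.Chars.rfindFrom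
  have h1 : ¬ ((t.length : Int) < ((g : Nat) : Int)) := by push_cast; omega
  have h2 : ¬ (((g : Nat) : Int) < (0 : Int)) := by push_cast; omega
  simp only [h1, if_false, h2]
  simp

theorem subst_lt_A (cs : List Char) (st en : Nat) (e : List Char)
    (hscan : scanA 0 none cs = (some st, some en))
    (he : e ∈ PySem.Chars.splitOn
      (PySem.Chars.stripChars (PySem.List.slice cs (some (st:Int)) (some (en:Int))) ['<', '>']) [' ']) :
    (PySem.List.slice cs none (some (st:Int)) ++ e ++ PySem.List.slice cs (some (en:Int)) none).length < cs.length := by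
  obtain ⟨q, m, rest, rfl, hst, hen, hq, hm, hm'⟩ := scan_some cs st en hscan
  subst hst; subst hen
  rw [slice_pre, slice_cyc, slice_suf] at *
  rw [strip_mid m (fun c hc => ⟨fun hh => hm' (hh ▸ hc), fun hh => hm (hh ▸ hc)⟩)] at he
  have hel := sp_len m [' '] e he
  simp only [List.length_append, List.length_cons]
  omega

-- literal port of A's recursion, on the character list
def eaGo (cs : List Char) : List Char :=
  match hscan : scanA 0 none cs with
  | (some st, some en) =>
    let elems := PySem.Chars.splitOn
      (PySem.Chars.stripChars (PySem.List.slice cs (some (st:Int)) (some (en:Int))) ['<', '>']) [' ']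
    PySem.Chars.join [' '] (elems.attach.map (fun e =>
      eaGo (PySem.List.slice cs none (some (st:Int)) ++ e.1 ++ PySem.List.slice cs (some (en:Int)) none)))
  | (_, _) => cs
termination_by cs.length
decreasing_by exact subst_lt_A cs st en e.1 hscan e.2

def expand_alternatives (s : String) : String := String.mk (eaGo s.toList)

-- ===== PORT B =====

theorem subst_lt_B (t : List Char) (e : List Char)
    (hlt : ¬ (if PySem.Chars.find t ['>'] = -1 then (-1 : Int)
              else PySem.Chars.rfindFrom t ['<'] 0 (some (PySem.Chars.find t ['>']))) = -1)
    (he : e ∈ PySem.Chars.splitOn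
      (PySem.List.slice t (some ((if PySem.Chars.find t ['>'] = -1 then (-1 : Int)
              else PySem.Chars.rfindFrom t ['<'] 0 (some (PySem.Chars.find t ['>']))) + 1))
        (some (PySem.Chars.find t ['>']))) [' ']) :
    (PySem.List.slice t none (some (if PySem.Chars.find t ['>'] = -1 then (-1 : Int)
              else PySem.Chars.rfindFrom t ['<'] 0 (some (PySem.Chars.find t ['>']))))
      ++ e ++ PySem.List.slice t (some (PySem.Chars.find t ['>'] + 1)) none).length < t.length := by
  by_cases hF : PySem.Chars.find t ['>'] = -1
  · simp [hF] at hlt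
  · have hmem : '>' ∈ t := infix_single.mp ((PySem.Chars.find_ne_neg_one_iff t ['>']).mp hF)
    obtain ⟨pre, rest, rfl, hpre⟩ := mem_split_first hmem
    by_cases hltp : '<' ∈ pre
    · obtain ⟨q, m, rfl, hm⟩ := mem_split_last hltp
      have hq : '>' ∉ q := fun hh => hpre (List.mem_append_left _ hh)
      have hm2 : '>' ∉ m := fun hh => hpre (List.mem_append_right _ (List.mem_cons_of_mem _ hh))
      have hshape : (q ++ '<' :: m) ++ '>' :: rest = q ++ '<' :: m ++ '>' :: rest := by simp
      rw [hshape] at he hlt ⊢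
      have hFv : PySem.Chars.find (q ++ '<' :: m ++ '>' :: rest) ['>'] = ((q.length + m.length + 1 : Nat) : Int) :=
        find_gt q m rest hq hm2
      have hFne : PySem.Chars.find (q ++ '<' :: m ++ '>' :: rest) ['>'] ≠ -1 := by
        rw [hFv]; push_cast; omega
      have hR : PySem.Chars.rfindFrom (q ++ '<' :: m ++ '>' :: rest) ['<'] 0
          (some (PySem.Chars.find (q ++ '<' :: m ++ '>' :: rest) ['>'])) = (q.length : Int) := by
        rw [hFv]; exact rfind_lt q m rest hm
      rw [if_neg hFne, hR, hFv] at he ⊢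
      have hcast1 : ((q.length : Int) + 1) = (((q.length + 1 : Nat)) : Int) := by push_cast; ring
      have hmid : PySem.List.slice (q ++ '<' :: m ++ '>' :: rest) (some ((q.length : Int) + 1))
          (some ((q.length + m.length + 1 : Nat) : Int)) = m := slice_mid q m rest
      rw [hmid] at he
      have hcast2 : (((q.length + m.length + 1 : Nat) : Int) + 1) = (((q.length + m.length + 2 : Nat)) : Int) := by
        push_cast; ring
      rw [hcast2, slice_pre, slice_suf]
      have hel := sp_len m [' '] e he
      simp only [List.length_append, List.length_cons]
      omega
    · exfalso
      have hFv : PySem.Chars.find (pre ++ '>' :: rest) ['>'] = (pre.length : Int) :=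
        find_first '>' pre rest hpre
      have htake : (pre ++ '>' :: rest).take pre.length = pre := List.take_left
      have : PySem.Chars.rfindFrom (pre ++ '>' :: rest) ['<'] 0
          (some (PySem.Chars.find (pre ++ '>' :: rest) ['>'])) = -1 := by
        rw [hFv, rfindFrom_take _ _ _ (by simp), htake, rfind_none pre '<' hltp]
        simp
      rw [if_neg (by rw [hFv]; push_cast; omega), this] at hlt
      exact hlt rfl

-- literal port of B's _collect: DFS appending finished leaves to the accumulator
def collectGo (t : List Char) (acc : List (List Char)) : List (List Char) :=
  let gt := PySem.Chars.find t ['>']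
  let lt := if gt = -1 then (-1 : Int) else PySem.Chars.rfindFrom t ['<'] 0 (some gt)
  if hlt : lt = -1 then acc ++ [t]
  else
    (PySem.Chars.splitOn (PySem.List.slice t (some (lt + 1)) (some gt)) [' ']).attach.foldl
      (fun a e => collectGo (PySem.List.slice t none (some lt) ++ e.1 ++ PySem.List.slice t (some (gt + 1)) none) a) acc
termination_by t.length
decreasing_by exact subst_lt_B t e.1 hlt e.2

def expand_alternatives_alt (s : String) : String :=
  String.mk (PySem.Chars.join [' '] (collectGo s.toList []))

-- ===== PRECONDITION & SPEC =====
def Spec_expand_alternatives (s : String) (out : String) : Prop := out = expand_alternatives_alt s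
instance (s : String) (out : String) : Decidable (Spec_expand_alternatives s out) := by unfold Spec_expand_alternatives; infer_instance

-- ===== CLAIM (what is proved, stated in full; the proofs are below) =====
def Claim_equal_expand_alternatives : Prop := ∀ (s : String), Dom_expand_alternatives s → Spec_expand_alternatives s (expand_alternatives s)

-- ===== LEMMAS AND PROOFS =====

theorem find_none (c : Char) (s : List Char) (h : c ∉ s) :
    PySem.Chars.find s [c] = -1 := by
  rw [PySem.Chars.find_eq_neg_one_iff, infix_single]
  exact h

theorem sp_go_ne (sep : List Char) (fuel : Nat) :
    ∀ l cur acc, PySem.Chars.splitOn.go sep fuel l cur acc ≠ [] := by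
  induction fuel with
  | zero =>
    intro l cur acc
    rw [PySem.Chars.splitOn.go]
    simp
  | succ fuel ih =>
    intro l cur acc
    match l with
    | [] =>
      rw [PySem.Chars.splitOn.go]
      · simp
      · intro hh; omega
    | c :: rest =>
      rw [PySem.Chars.splitOn.go]
      by_cases hpre : sep.isPrefixOf (c :: rest)
      · simp only [hpre, if_true]
        exact ih _ _ _
      · simp only [hpre, Bool.false_eq_true, if_false]
        exact ih _ _ _

theorem sp_ne (s sep : List Char) : PySem.Chars.splitOn s sep ≠ [] := by
  unfold PySem.Chars.splitOn
  exact sp_go_ne sep (s.length + 1) s [] []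


-- evaluation of A's port on the three input shapes

theorem eaGo_leaf (cs : List Char) (h : ∀ st en, scanA 0 none cs ≠ (some st, some en)) :
    eaGo cs = cs := by
  rw [eaGo.eq_def]
  split
  · next st en heq => exact absurd heq (h st en)
  · rfl

theorem eaGo_leaf1 (cs : List Char) (h : '>' ∉ cs) : eaGo cs = cs := by
  apply eaGo_leaf
  intro st en heq
  rw [scan_no_gt cs 0 none h] at heq
  simp at heq

theorem eaGo_leaf2 (pre rest : List Char) (hpre : '>' ∉ pre) (hltp : '<' ∉ pre) :
    eaGo (pre ++ '>' :: rest) = pre ++ '>' :: rest := by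
  apply eaGo_leaf
  intro st en heq
  rw [scan_pre pre rest 0 none hpre, lastLt_no pre 0 none hltp] at heq
  simp at heq

theorem scan_pair_eq (q m rest : List Char) (hq : '>' ∉ q) (hm : '>' ∉ m) (hm' : '<' ∉ m) :
    scanA 0 none (q ++ '<' :: m ++ '>' :: rest) = (some q.length, some (q.length + m.length + 2)) := by
  have hpre : '>' ∉ q ++ '<' :: m := by
    intro hh
    rcases List.mem_append.mp hh with hh | hh
    · exact hq hh
    · rcases List.mem_cons.mp hh with hh | hh
      · exact absurd hh.symm (by decide)
      · exact hm hh
  rw [show q ++ '<' :: m ++ '>' :: rest = (q ++ '<' :: m) ++ '>' :: rest from by simp]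
  rw [scan_pre _ rest 0 none hpre, lastLt_last q m 0 none hm']
  simp
  omega

theorem eaGo_pair (q m rest : List Char) (hq : '>' ∉ q) (hm : '>' ∉ m) (hm' : '<' ∉ m) :
    eaGo (q ++ '<' :: m ++ '>' :: rest) =
      PySem.Chars.join [' '] ((PySem.Chars.splitOn m [' ']).map (fun e => eaGo (q ++ e ++ rest))) := by
  rw [eaGo.eq_def, scan_pair_eq q m rest hq hm hm']
  show PySem.Chars.join [' ']
      ((PySem.Chars.splitOn
        (PySem.Chars.stripChars (PySem.List.slice (q ++ '<' :: m ++ '>' :: rest)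
          (some ((q.length : Nat) : Int)) (some ((q.length + m.length + 2 : Nat) : Int))) ['<', '>']) [' ']).attach.map
        (fun e => eaGo (PySem.List.slice (q ++ '<' :: m ++ '>' :: rest) none (some ((q.length : Nat) : Int)) ++ e.1 ++
          PySem.List.slice (q ++ '<' :: m ++ '>' :: rest) (some ((q.length + m.length + 2 : Nat) : Int)) none))) = _
  rw [slice_cyc, strip_mid m (fun c hc => ⟨fun hh => hm' (hh ▸ hc), fun hh => hm (hh ▸ hc)⟩)]
  rw [slice_pre, slice_suf]
  exact congrArg (PySem.Chars.join [' ']) (List.attach_map_val (f := fun e => eaGo (q ++ e ++ rest)))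

-- evaluation of B's port on the three input shapes

theorem collect_leaf1 (t : List Char) (acc : List (List Char)) (h : '>' ∉ t) :
    collectGo t acc = acc ++ [t] := by
  rw [collectGo.eq_def]
  simp [find_none '>' t h]

theorem collect_leaf2 (pre rest : List Char) (acc : List (List Char))
    (hpre : '>' ∉ pre) (hltp : '<' ∉ pre) :
    collectGo (pre ++ '>' :: rest) acc = acc ++ [pre ++ '>' :: rest] := by
  have hFv : PySem.Chars.find (pre ++ '>' :: rest) ['>'] = (pre.length : Int) :=
    find_first '>' pre rest hpre
  have htake : (pre ++ '>' :: rest).take pre.length = pre := List.take_left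
  have hR : PySem.Chars.rfindFrom (pre ++ '>' :: rest) ['<'] 0
      (some (PySem.Chars.find (pre ++ '>' :: rest) ['>'])) = -1 := by
    rw [hFv, rfindFrom_take _ _ _ (by simp), htake, rfind_none pre '<' hltp]
    simp
  have hcond : (if PySem.Chars.find (pre ++ '>' :: rest) ['>'] = -1 then (-1 : Int)
      else PySem.Chars.rfindFrom (pre ++ '>' :: rest) ['<'] 0
        (some (PySem.Chars.find (pre ++ '>' :: rest) ['>']))) = -1 := by
    have hne2 : ¬ (PySem.Chars.find (pre ++ '>' :: rest) ['>'] = -1) := by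
      rw [hFv]; omega
    rw [if_neg hne2, hR]
  rw [collectGo.eq_def]
  show (if _hlt : (if PySem.Chars.find (pre ++ '>' :: rest) ['>'] = -1 then (-1 : Int) else PySem.Chars.rfindFrom (pre ++ '>' :: rest) ['<'] 0 (some (PySem.Chars.find (pre ++ '>' :: rest) ['>']))) = -1 then acc ++ [pre ++ '>' :: rest]
    else (PySem.Chars.splitOn (PySem.List.slice (pre ++ '>' :: rest) (some ((if PySem.Chars.find (pre ++ '>' :: rest) ['>'] = -1 then (-1 : Int) else PySem.Chars.rfindFrom (pre ++ '>' :: rest) ['<'] 0 (some (PySem.Chars.find (pre ++ '>' :: rest) ['>']))) + 1)) (some (PySem.Chars.find (pre ++ '>' :: rest) ['>']))) [' ']).attach.foldl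
      (fun a e => collectGo (PySem.List.slice (pre ++ '>' :: rest) none (some (if PySem.Chars.find (pre ++ '>' :: rest) ['>'] = -1 then (-1 : Int) else PySem.Chars.rfindFrom (pre ++ '>' :: rest) ['<'] 0 (some (PySem.Chars.find (pre ++ '>' :: rest) ['>'])))) ++ e.1 ++ PySem.List.slice (pre ++ '>' :: rest) (some (PySem.Chars.find (pre ++ '>' :: rest) ['>'] + 1)) none) a) acc) = _
  rw [hcond]
  simp

theorem collect_pair (q m rest : List Char) (acc : List (List Char))
    (hq : '>' ∉ q) (hm : '>' ∉ m) (hm' : '<' ∉ m) :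
    collectGo (q ++ '<' :: m ++ '>' :: rest) acc =
      (PySem.Chars.splitOn m [' ']).foldl (fun a e => collectGo (q ++ e ++ rest) a) acc := by
  rw [collectGo.eq_def]
  have hFv : PySem.Chars.find (q ++ '<' :: m ++ '>' :: rest) ['>'] = ((q.length + m.length + 1 : Nat) : Int) :=
    find_gt q m rest hq hm
  have hFne : PySem.Chars.find (q ++ '<' :: m ++ '>' :: rest) ['>'] ≠ -1 := by
    rw [hFv]; omega
  have hR : PySem.Chars.rfindFrom (q ++ '<' :: m ++ '>' :: rest) ['<'] 0
      (some (PySem.Chars.find (q ++ '<' :: m ++ '>' :: rest) ['>'])) = (q.length : Int) := by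
    rw [hFv]; exact rfind_lt q m rest hm'
  have hcond : (if PySem.Chars.find (q ++ '<' :: m ++ '>' :: rest) ['>'] = -1 then (-1 : Int)
      else PySem.Chars.rfindFrom (q ++ '<' :: m ++ '>' :: rest) ['<'] 0
        (some (PySem.Chars.find (q ++ '<' :: m ++ '>' :: rest) ['>']))) = (q.length : Int) := by
    rw [if_neg hFne, hR]
  show (if _hlt : (if PySem.Chars.find (q ++ '<' :: m ++ '>' :: rest) ['>'] = -1 then (-1 : Int) else PySem.Chars.rfindFrom (q ++ '<' :: m ++ '>' :: rest) ['<'] 0 (some (PySem.Chars.find (q ++ '<' :: m ++ '>' :: rest) ['>']))) = -1 then acc ++ [q ++ '<' :: m ++ '>' :: rest]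
    else (PySem.Chars.splitOn (PySem.List.slice (q ++ '<' :: m ++ '>' :: rest) (some ((if PySem.Chars.find (q ++ '<' :: m ++ '>' :: rest) ['>'] = -1 then (-1 : Int) else PySem.Chars.rfindFrom (q ++ '<' :: m ++ '>' :: rest) ['<'] 0 (some (PySem.Chars.find (q ++ '<' :: m ++ '>' :: rest) ['>']))) + 1)) (some (PySem.Chars.find (q ++ '<' :: m ++ '>' :: rest) ['>']))) [' ']).attach.foldl
      (fun a e => collectGo (PySem.List.slice (q ++ '<' :: m ++ '>' :: rest) none (some (if PySem.Chars.find (q ++ '<' :: m ++ '>' :: rest) ['>'] = -1 then (-1 : Int) else PySem.Chars.rfindFrom (q ++ '<' :: m ++ '>' :: rest) ['<'] 0 (some (PySem.Chars.find (q ++ '<' :: m ++ '>' :: rest) ['>'])))) ++ e.1 ++ PySem.List.slice (q ++ '<' :: m ++ '>' :: rest) (some (PySem.Chars.find (q ++ '<' :: m ++ '>' :: rest) ['>'] + 1)) none) a) acc) = _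
  rw [hcond]
  have hq2 : ¬ ((q.length : Int) = -1) := by omega
  rw [dif_neg hq2]
  rw [hFv]
  have hcast2 : (((q.length + m.length + 1 : Nat) : Int) + 1) = (((q.length + m.length + 2 : Nat)) : Int) := by
    push_cast; ring
  rw [hcast2, slice_mid, slice_pre, slice_suf]
  exact List.foldl_attach (f := fun a e => collectGo (q ++ e ++ rest) a)

-- the three input shapes are exhaustive
theorem tri (cs : List Char) :
    ('>' ∉ cs) ∨ (∃ pre rest, cs = pre ++ '>' :: rest ∧ '>' ∉ pre ∧ '<' ∉ pre) ∨
      (∃ q m rest, cs = q ++ '<' :: m ++ '>' :: rest ∧ '>' ∉ q ∧ '>' ∉ m ∧ '<' ∉ m) := by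
  by_cases hmem : '>' ∈ cs
  · obtain ⟨pre, rest, rfl, hpre⟩ := mem_split_first hmem
    by_cases hltp : '<' ∈ pre
    · obtain ⟨q, m, rfl, hm⟩ := mem_split_last hltp
      refine Or.inr (Or.inr ⟨q, m, rest, by simp, ?_, ?_, hm⟩)
      · exact fun hh => hpre (List.mem_append_left _ hh)
      · exact fun hh => hpre (List.mem_append_right _ (List.mem_cons_of_mem _ hh))
    · exact Or.inr (Or.inl ⟨pre, rest, rfl, hpre, hltp⟩)
  · exact Or.inl hmem

theorem sub_len (q m rest e : List Char) (he : e ∈ PySem.Chars.splitOn m [' ']) :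
    (q ++ e ++ rest).length < (q ++ '<' :: m ++ '>' :: rest).length := by
  have := sp_len m [' '] e he
  simp only [List.length_append, List.length_cons]
  omega

theorem join_append (sep : List Char) (xs ys : List (List Char)) (hx : xs ≠ []) (hy : ys ≠ []) :
    PySem.Chars.join sep (xs ++ ys) = PySem.Chars.join sep xs ++ sep ++ PySem.Chars.join sep ys := by
  induction xs with
  | nil => exact absurd rfl hx
  | cons x xs ih =>
    cases xs with
    | nil =>
      cases ys with
      | nil => exact absurd rfl hy
      | cons y ys' =>
        rw [List.singleton_append, PySem.Chars.join_cons_cons, PySem.Chars.join_singleton]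
    | cons x2 xs2 =>
      rw [List.cons_append, PySem.Chars.join_cons_cons]
      rw [show (x2 :: xs2) ++ ys = x2 :: (xs2 ++ ys) from rfl]
      rw [show PySem.Chars.join sep (x :: x2 :: (xs2 ++ ys)) = x ++ sep ++ PySem.Chars.join sep (x2 :: (xs2 ++ ys)) from PySem.Chars.join_cons_cons ..]
      rw [show x2 :: (xs2 ++ ys) = (x2 :: xs2) ++ ys from rfl]
      rw [ih (by simp)]
      simp [List.append_assoc]

theorem join_flatten (sep : List Char) (xss : List (List (List Char)))
    (h : ∀ xs ∈ xss, xs ≠ []) :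
    PySem.Chars.join sep (xss.map (PySem.Chars.join sep)) = PySem.Chars.join sep xss.flatten := by
  induction xss with
  | nil => simp
  | cons xs xss ih =>
    cases xss with
    | nil => simp [PySem.Chars.join_singleton]
    | cons xs2 xss2 =>
      rw [List.map_cons, List.map_cons, PySem.Chars.join_cons_cons]
      rw [show PySem.Chars.join sep xs2 :: List.map (PySem.Chars.join sep) xss2 = List.map (PySem.Chars.join sep) (xs2 :: xss2) from rfl]
      rw [ih (fun a ha => h a (List.mem_cons_of_mem _ ha))]
      have hfl : (xs2 ++ xss2.flatten : List (List Char)) ≠ [] := by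
        have h2 := h xs2 (List.mem_cons_of_mem _ (List.mem_cons_self ..))
        cases xs2 with
        | nil => exact absurd rfl h2
        | cons a b => simp
      rw [show ((xs :: xs2 :: xss2).flatten : List (List Char)) = xs ++ (xs2 ++ xss2.flatten) from by simp]
      exact (join_append sep xs (xs2 ++ xss2.flatten) (h xs (List.mem_cons_self ..)) hfl).symm

theorem foldl_acc_append {β : Type} (f : List (List Char) → β → List (List Char)) (l : List β)
    (hf : ∀ a e, e ∈ l → f a e = a ++ f [] e) : ∀ acc,
    l.foldl f acc = acc ++ l.foldl f [] := by
  induction l with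
  | nil => intro acc; simp
  | cons e l ih =>
    intro acc
    have hf' : ∀ a e', e' ∈ l → f a e' = a ++ f [] e' := fun a e' he' => hf a e' (List.mem_cons_of_mem _ he')
    rw [List.foldl_cons, ih hf', List.foldl_cons, ih hf' (f [] e)]
    rw [hf acc e (List.mem_cons_self ..)]
    simp [List.append_assoc]

theorem foldl_eq_flatten (g : List Char → List Char) (l : List (List Char))
    (hf : ∀ a e, e ∈ l → collectGo (g e) a = a ++ collectGo (g e) []) :
    l.foldl (fun a e => collectGo (g e) a) [] = (l.map (fun e => collectGo (g e) [])).flatten := by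
  induction l with
  | nil => rfl
  | cons e l ih =>
    rw [List.foldl_cons, List.map_cons, List.flatten_cons]
    have hf' : ∀ a e', e' ∈ l → collectGo (g e') a = a ++ collectGo (g e') [] :=
      fun a e' he' => hf a e' (List.mem_cons_of_mem _ he')
    rw [foldl_acc_append _ l (fun a e' he' => hf' a e' he') (collectGo (g e) []), ih hf']

theorem collect_append_aux : ∀ (n : Nat) (cs : List Char) (acc : List (List Char)),
    cs.length ≤ n → collectGo cs acc = acc ++ collectGo cs [] := by
  intro n
  induction n with
  | zero =>
    intro cs acc hn
    have : cs = [] := List.length_eq_zero_iff.mp (Nat.le_zero.mp hn)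
    subst this
    rw [collect_leaf1 _ _ (by simp), collect_leaf1 _ _ (by simp)]
    simp
  | succ n ih =>
    intro cs acc hn
    rcases tri cs with h | ⟨pre, rest, rfl, h1, h2⟩ | ⟨q, m, rest, rfl, h1, h2, h3⟩
    · rw [collect_leaf1 _ _ h, collect_leaf1 _ _ h]; simp
    · rw [collect_leaf2 _ _ _ h1 h2, collect_leaf2 _ _ _ h1 h2]; simp
    · rw [collect_pair q m rest acc h1 h2 h3, collect_pair q m rest [] h1 h2 h3]
      have hf : ∀ a e, e ∈ PySem.Chars.splitOn m [' '] →
          collectGo (q ++ e ++ rest) a = a ++ collectGo (q ++ e ++ rest) [] := by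
        intro a e he
        exact ih (q ++ e ++ rest) a (by have := sub_len q m rest e he; omega)
      rw [foldl_acc_append _ _ hf acc]

theorem collect_append (cs : List Char) (acc : List (List Char)) :
    collectGo cs acc = acc ++ collectGo cs [] :=
  collect_append_aux cs.length cs acc (le_refl _)

theorem collect_ne_aux : ∀ (n : Nat) (cs : List Char),
    cs.length ≤ n → collectGo cs [] ≠ [] := by
  intro n
  induction n with
  | zero =>
    intro cs hn
    have : cs = [] := List.length_eq_zero_iff.mp (Nat.le_zero.mp hn)
    subst this
    rw [collect_leaf1 _ _ (by simp)]
    simp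
  | succ n ih =>
    intro cs hn
    rcases tri cs with h | ⟨pre, rest, rfl, h1, h2⟩ | ⟨q, m, rest, rfl, h1, h2, h3⟩
    · rw [collect_leaf1 _ _ h]; simp
    · rw [collect_leaf2 _ _ _ h1 h2]; simp
    · rw [collect_pair q m rest [] h1 h2 h3]
      obtain ⟨e0, l', hsplit⟩ := List.exists_cons_of_ne_nil (sp_ne m [' '])
      rw [hsplit]
      rw [List.foldl_cons]
      rw [foldl_acc_append _ l' (fun a e' he' => collect_append (q ++ e' ++ rest) a) _]
      have hne0 : collectGo (q ++ e0 ++ rest) [] ≠ [] := by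
        apply ih
        have := sub_len q m rest e0 (hsplit ▸ List.mem_cons_self ..)
        omega
      intro hcontra
      rw [List.append_eq_nil_iff] at hcontra
      exact hne0 hcontra.1

theorem collect_ne (cs : List Char) : collectGo cs [] ≠ [] :=
  collect_ne_aux cs.length cs (le_refl _)

theorem main_aux : ∀ (n : Nat) (cs : List Char), cs.length ≤ n →
    PySem.Chars.join [' '] (collectGo cs []) = eaGo cs := by
  intro n
  induction n with
  | zero =>
    intro cs hn
    have : cs = [] := List.length_eq_zero_iff.mp (Nat.le_zero.mp hn)
    subst this
    rw [collect_leaf1 _ _ (by simp), eaGo_leaf1 _ (by simp)]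
    simp [PySem.Chars.join_singleton]
  | succ n ih =>
    intro cs hn
    rcases tri cs with h | ⟨pre, rest, rfl, h1, h2⟩ | ⟨q, m, rest, rfl, h1, h2, h3⟩
    · rw [collect_leaf1 _ _ h, eaGo_leaf1 _ h]
      simp [PySem.Chars.join_singleton]
    · rw [collect_leaf2 _ _ _ h1 h2, eaGo_leaf2 _ _ h1 h2]
      simp [PySem.Chars.join_singleton]
    · rw [collect_pair q m rest [] h1 h2 h3, eaGo_pair q m rest h1 h2 h3]
      have hf : ∀ a e, e ∈ PySem.Chars.splitOn m [' '] →
          collectGo (q ++ e ++ rest) a = a ++ collectGo (q ++ e ++ rest) [] :=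
        fun a e _ => collect_append (q ++ e ++ rest) a
      rw [foldl_eq_flatten (fun e => q ++ e ++ rest) _ hf]
      have hmap : (PySem.Chars.splitOn m [' ']).map (fun e => eaGo (q ++ e ++ rest)) =
          (PySem.Chars.splitOn m [' ']).map (fun e => PySem.Chars.join [' '] (collectGo (q ++ e ++ rest) [])) := by
        apply List.map_congr_left
        intro e he
        exact (ih (q ++ e ++ rest) (by have := sub_len q m rest e he; omega)).symm
      rw [hmap]
      rw [show (PySem.Chars.splitOn m [' ']).map
            (fun e => PySem.Chars.join [' '] (collectGo (q ++ e ++ rest) [])) =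
          ((PySem.Chars.splitOn m [' ']).map (fun e => collectGo (q ++ e ++ rest) [])).map
            (PySem.Chars.join [' ']) from by rw [List.map_map]; rfl]
      rw [join_flatten [' '] _ (by
        intro xs hxs
        obtain ⟨e, _, rfl⟩ := List.mem_map.mp hxs
        exact collect_ne _)]

theorem main_eq (cs : List Char) : PySem.Chars.join [' '] (collectGo cs []) = eaGo cs :=
  main_aux cs.length cs (le_refl _)

-- ===== VERDICT (by name: the statement is the Claim_ definition above) =====
theorem expand_alternatives_spec : Claim_equal_expand_alternatives := by
  intro s _
  show _ = _
  unfold expand_alternatives expand_alternatives_alt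
  rw [main_eq]
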